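-- pv_equiv track=rewrite | github.com/raywted75/Meta-Coding-Puzzles | Level 1/Kaitenzushi.py | getMaximumEatenDishCount
-- ===== SOURCE A (Python) =====
-- from typing import List
-- from collections import deque
--
-- def getMaximumEatenDishCount(N: int, D: List[int], K: int) -> int:
--   # Write your code here
--   eaten = deque()
--   eaten_type = set()
--   res = 0
--
--   for i in range(N):
--     if D[i] not in eaten_type:
--       res += 1
--
--       eaten.append(D[i])
--       eaten_type.add(D[i])
--
--       if len(eaten) > K:
--         eaten_type.remove(eaten.popleft())
--
--   return res
-- ===== SOURCE B (Python) =====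
-- from typing import List
--
-- def getMaximumEatenDishCount(N: int, D: List[int], K: int) -> int:
--   # dict: dish type -> sequence number (res value) at which it was last eaten.
--   # A dish is eatable iff never eaten, or at least K dishes were eaten since.
--   # No window / eviction needed: stale entries are neutralised by the arithmetic.
--   last = {}
--   res = 0
--   for i in range(N):
--     d = D[i]
--     s = last.get(d)
--     if s is None or res - s >= K:
--       res += 1
--       last[d] = res
--   return res
-- ===== Notes on version B (the rewrite author's own statement) =====
-- stated objective: simpler
-- what changed: Replaced the deque+set sliding window with eviction by a single dict mapping each dish type to the sequence number at which it was last eaten; a dish is eaten iff unseen or res - last[d] >= K, so the eviction step disappears entirely.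
import Mathlib
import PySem

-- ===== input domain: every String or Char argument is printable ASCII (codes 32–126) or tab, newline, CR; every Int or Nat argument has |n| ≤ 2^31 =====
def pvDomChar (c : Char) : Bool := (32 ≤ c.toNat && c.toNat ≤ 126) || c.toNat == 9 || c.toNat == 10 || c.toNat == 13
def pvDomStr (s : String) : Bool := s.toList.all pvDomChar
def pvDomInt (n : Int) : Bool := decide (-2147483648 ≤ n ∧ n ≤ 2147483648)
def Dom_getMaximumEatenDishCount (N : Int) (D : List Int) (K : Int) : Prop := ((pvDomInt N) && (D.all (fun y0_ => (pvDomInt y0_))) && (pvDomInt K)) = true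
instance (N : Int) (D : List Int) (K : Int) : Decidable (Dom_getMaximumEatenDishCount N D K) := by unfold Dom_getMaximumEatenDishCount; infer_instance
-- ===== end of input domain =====

-- B replaces A's deque+set sliding window (with explicit eviction) by a dict from dish
-- type to the sequence number of its last eat and an arithmetic guard: simpler, no eviction.

-- ===== PORT A =====
-- loop body of A; state = (eaten deque, eaten_type set, res).
-- 'eaten_type.remove(x)' is ported as Set.discard: x was just popped from 'eaten' and the
-- set always holds exactly the deque's elements, so the KeyError branch is unreachable.
def stepA (D : List Int) (K : Int) (st : List Int × PySem.Set Int × Int) (i : Int) :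
    List Int × PySem.Set Int × Int :=
  let d := PySem.List.pyGetD D i 0
  if PySem.Set.contains st.2.1 d then st
  else
    let eaten := st.1 ++ [d]
    let etype := PySem.Set.add st.2.1 d
    let res := st.2.2 + 1
    if (eaten.length : Int) > K then
      match eaten with
      | [] => ([], etype, res)
      | x :: rest => (rest, PySem.Set.discard etype x, res)
    else (eaten, etype, res)

def getMaximumEatenDishCount (N : Int) (D : List Int) (K : Int) : Int :=
  ((PySem.List.pyRange 0 N 1).foldl (stepA D K) ([], PySem.Set.empty, 0)).2.2

-- ===== PORT B =====
-- loop body of B; state = (last : dict dish ↦ seq of last eat, res).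
def stepB (D : List Int) (K : Int) (st : PySem.Dict Int Int × Int) (i : Int) :
    PySem.Dict Int Int × Int :=
  let d := PySem.List.pyGetD D i 0
  let eat := match st.1.get? d with
    | none => true
    | some s => decide (K ≤ st.2 - s)
  if eat then (st.1.insert d (st.2 + 1), st.2 + 1) else st

def getMaximumEatenDishCount_alt (N : Int) (D : List Int) (K : Int) : Int :=
  ((PySem.List.pyRange 0 N 1).foldl (stepB D K) (PySem.Dict.empty, 0)).2

-- ===== PRECONDITION & SPEC =====
-- Python A (and B) raises IndexError iff some i in range(N) has i ≥ len(D); Pre_ is exactly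
-- the inputs where A returns.
def Pre_getMaximumEatenDishCount (N : Int) (D : List Int) (K : Int) : Prop :=
  N ≤ (D.length : Int) ∨ N ≤ 0
instance (N : Int) (D : List Int) (K : Int) : Decidable (Pre_getMaximumEatenDishCount N D K) := by
  unfold Pre_getMaximumEatenDishCount; infer_instance

def pvWitness_getMaximumEatenDishCount : Int × List Int × Int := (4, [1, 2, 1, 3], 2)

def Spec_getMaximumEatenDishCount (N : Int) (D : List Int) (K : Int) (out : Int) : Prop := out = getMaximumEatenDishCount_alt N D K
instance (N : Int) (D : List Int) (K : Int) (out : Int) : Decidable (Spec_getMaximumEatenDishCount N D K out) := by unfold Spec_getMaximumEatenDishCount; infer_instance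

-- ===== CLAIM (what is proved, stated in full; the proofs are below) =====
def Claim_equal_getMaximumEatenDishCount : Prop := ∀ (N : Int) (D : List Int) (K : Int), Dom_getMaximumEatenDishCount N D K → Pre_getMaximumEatenDishCount N D K → Spec_getMaximumEatenDishCount N D K (getMaximumEatenDishCount N D K)

-- ===== LEMMAS AND PROOFS =====

-- The coupling invariant between A's window state and B's dict state:
-- the window is duplicate-free and at most max K 0 long, the set mirrors the deque,
-- the j-th window element was eaten at sequence number res - len + 1 + j (window
-- sequence numbers are consecutive and end at res), and every dish outside the
-- window that was ever eaten was eaten at least K eats ago.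
def WinInv (K : Int) (eaten : List Int) (etype : PySem.Set Int) (res : Int)
    (last : PySem.Dict Int Int) : Prop :=
  eaten.Nodup ∧
  (eaten.length : Int) ≤ max K 0 ∧
  (∀ x : Int, x ∈ etype ↔ x ∈ eaten) ∧
  (∀ j : Nat, (hj : j < eaten.length) →
      last.get? eaten[j] = some (res - eaten.length + 1 + j)) ∧
  (∀ x s : Int, last.get? x = some s → x ∉ eaten → K ≤ res - s)

lemma step_inv (D : List Int) (K i : Int) (eaten : List Int) (etype : PySem.Set Int)
    (res : Int) (last : PySem.Dict Int Int) (h : WinInv K eaten etype res last) :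
    (stepA D K (eaten, etype, res) i).2.2 = (stepB D K (last, res) i).2 ∧
    WinInv K (stepA D K (eaten, etype, res) i).1 (stepA D K (eaten, etype, res) i).2.1
      (stepA D K (eaten, etype, res) i).2.2 (stepB D K (last, res) i).1 := by
  obtain ⟨hnd, hlen, hmem, hpos, hout⟩ := h
  by_cases hd : PySem.List.pyGetD D i 0 ∈ eaten
  · -- the dish is in the window: A skips; B sees res - last[d] < K and skips too
    have hin : PySem.List.pyGetD D i 0 ∈ etype := (hmem _).mpr hd
    obtain ⟨j, hj, hej⟩ := List.getElem_of_mem hd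
    have hget : last.get? (PySem.List.pyGetD D i 0) = some (res - eaten.length + 1 + j) := by
      rw [← hej]; exact hpos j hj
    have hA : stepA D K (eaten, etype, res) i = (eaten, etype, res) := by
      simp [stepA, hin]
    have hB : stepB D K (last, res) i = (last, res) := by
      have hj' : (j : Int) < (eaten.length : Int) := by exact_mod_cast hj
      have hno : ¬ (K ≤ res - (res - (eaten.length : Int) + 1 + (j : Int))) := by omega
      simp [stepB, hget, hno]
    rw [hA, hB]
    exact ⟨rfl, hnd, hlen, hmem, hpos, hout⟩
  · -- the dish is not in the window: both eat
    have hnin : PySem.List.pyGetD D i 0 ∉ etype := fun hx => hd ((hmem _).mp hx)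
    have hB : stepB D K (last, res) i
        = (last.insert (PySem.List.pyGetD D i 0) (res + 1), res + 1) := by
      simp only [stepB]
      cases hg : last.get? (PySem.List.pyGetD D i 0) with
      | none => simp
      | some s => simp [hout _ s hg hd]
    rw [hB]
    by_cases hpop : K ≤ (eaten.length : Int)
    · -- window overflows after the append: A pops the front
      cases eaten with
      | nil =>
          have hK0 : K ≤ 0 := by simpa using hpop
          have hA : stepA D K ([], etype, res) i
              = ([], PySem.Set.discard (PySem.Set.add etype (PySem.List.pyGetD D i 0))
                       (PySem.List.pyGetD D i 0), res + 1) := by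
            have hKlt : K < 1 := by omega
            simp [stepA, hnin, hKlt]
          rw [hA]
          refine ⟨rfl, List.nodup_nil, by dsimp only; simp, ?_, by simp, ?_⟩
          · intro x
            dsimp only
            simp only [PySem.Set.mem_discard, PySem.Set.mem_add, List.not_mem_nil, iff_false]
            rintro ⟨hx | hx, hne⟩
            · exact absurd ((hmem x).mp hx) (by simp)
            · exact hne hx
          · intro x s hs hxe
            dsimp only at hs hxe ⊢
            by_cases hx : x = PySem.List.pyGetD D i 0
            · subst hx
              rw [PySem.Dict.get?_insert_self] at hs
              have : s = res + 1 := (Option.some.inj hs).symm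
              omega
            · rw [PySem.Dict.get?_insert_of_ne _ _ hx] at hs
              have := hout x s hs (by simp)
              omega
      | cons x0 rest =>
          have hx0r : x0 ∉ rest := (List.nodup_cons.mp hnd).1
          have hndr : rest.Nodup := (List.nodup_cons.mp hnd).2
          have hdx0 : PySem.List.pyGetD D i 0 ≠ x0 := fun hh => hd (hh ▸ List.mem_cons_self)
          have hdr : PySem.List.pyGetD D i 0 ∉ rest := fun hh => hd (List.mem_cons_of_mem _ hh)
          have hA : stepA D K (x0 :: rest, etype, res) i
              = (rest ++ [PySem.List.pyGetD D i 0],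
                 PySem.Set.discard (PySem.Set.add etype (PySem.List.pyGetD D i 0)) x0,
                 res + 1) := by
            simp [stepA, hnin]
            all_goals (simp only [List.length_cons] at hpop; push_cast at hpop ⊢; omega)
          rw [hA]
          refine ⟨rfl, ?_, ?_, ?_, ?_, ?_⟩
          · -- Nodup
            dsimp only
            exact List.Nodup.append hndr (List.nodup_singleton _)
              (fun a ha hb => hdr ((List.mem_singleton.mp hb) ▸ ha))
          · -- length bound
            dsimp only
            simp only [List.length_append, List.length_cons, List.length_nil] at hlen ⊢
            push_cast at hlen ⊢
            omega
          · -- set mirrors deque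
            intro x
            dsimp only
            have hxr0 : x ∈ rest → ¬ x = x0 := fun hy hh => hx0r (hh ▸ hy)
            have hdd0 : x = PySem.List.pyGetD D i 0 → ¬ x = x0 := by
              intro hh; subst hh; exact hdx0
            simp only [PySem.Set.mem_discard, PySem.Set.mem_add, hmem, List.mem_cons,
              List.mem_append]
            tauto
          · -- positions
            intro j hj
            dsimp only at hj ⊢
            simp only [List.length_append, List.length_cons, List.length_nil] at hj
            by_cases hjr : j < rest.length
            · have he1 : (rest ++ [PySem.List.pyGetD D i 0])[j]'(by simp; omega) = rest[j] :=
                List.getElem_append_left hjr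
              have hne : rest[j] ≠ PySem.List.pyGetD D i 0 :=
                fun hh => hdr (hh ▸ List.getElem_mem hjr)
              have hp := hpos (j + 1) (by simp; omega)
              simp only [List.getElem_cons_succ] at hp
              rw [he1, PySem.Dict.get?_insert_of_ne _ _ hne, hp]
              congr 1
              simp only [List.length_append, List.length_cons, List.length_nil]
              push_cast
              omega
            · have hjl : j = rest.length := by omega
              subst hjl
              have he1 : (rest ++ [PySem.List.pyGetD D i 0])[rest.length]'(by simp)
                  = PySem.List.pyGetD D i 0 := List.getElem_concat_length rfl (by simp)
              rw [he1, PySem.Dict.get?_insert_self]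
              congr 1
              simp only [List.length_append, List.length_cons, List.length_nil]
              push_cast
              omega
          · -- away-from-window bound
            intro x s hs hxe
            dsimp only at hs hxe ⊢
            simp only [List.mem_append, List.mem_singleton, not_or] at hxe
            obtain ⟨hxr, hxd⟩ := hxe
            rw [PySem.Dict.get?_insert_of_ne _ _ hxd] at hs
            by_cases hx0 : x = x0
            · subst hx0
              have h0 := hpos 0 (by simp)
              simp only [List.getElem_cons_zero] at h0
              rw [h0] at hs
              have hsv := (Option.some.inj hs).symm
              simp only [List.length_cons] at hsv hpop hlen ⊢
              push_cast at hsv hpop hlen ⊢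
              omega
            · have := hout x s hs (by simp [hx0, hxr])
              omega
    · -- window still fits: A just appends
      have hA : stepA D K (eaten, etype, res) i
          = (eaten ++ [PySem.List.pyGetD D i 0],
             PySem.Set.add etype (PySem.List.pyGetD D i 0), res + 1) := by
        simp [stepA, hnin]
        omega
      rw [hA]
      refine ⟨rfl, ?_, ?_, ?_, ?_, ?_⟩
      · dsimp only
        exact List.Nodup.append hnd (List.nodup_singleton _)
          (fun a ha hb => hd ((List.mem_singleton.mp hb) ▸ ha))
      · dsimp only
        simp only [List.length_append, List.length_singleton]
        push_cast
        omega
      · intro x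
        dsimp only
        simp only [PySem.Set.mem_add, hmem, List.mem_append, List.mem_singleton]
      · intro j hj
        dsimp only at hj ⊢
        simp only [List.length_append, List.length_singleton, List.length_nil] at hj
        by_cases hjr : j < eaten.length
        · have he1 : (eaten ++ [PySem.List.pyGetD D i 0])[j]'(by simp; omega) = eaten[j] :=
            List.getElem_append_left hjr
          have hne : eaten[j] ≠ PySem.List.pyGetD D i 0 :=
            fun hh => hd (hh ▸ List.getElem_mem hjr)
          rw [he1, PySem.Dict.get?_insert_of_ne _ _ hne, hpos j hjr]
          congr 1
          simp only [List.length_append, List.length_cons, List.length_nil]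
          push_cast
          omega
        · have hjl : j = eaten.length := by omega
          subst hjl
          have he1 : (eaten ++ [PySem.List.pyGetD D i 0])[eaten.length]'(by simp)
              = PySem.List.pyGetD D i 0 := List.getElem_concat_length rfl (by simp)
          rw [he1, PySem.Dict.get?_insert_self]
          congr 1
          simp only [List.length_append, List.length_cons, List.length_nil]
          push_cast
          omega
      · intro x s hs hxe
        dsimp only at hs hxe ⊢
        simp only [List.mem_append, List.mem_singleton, not_or] at hxe
        obtain ⟨hxr, hxd⟩ := hxe
        rw [PySem.Dict.get?_insert_of_ne _ _ hxd] at hs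
        have := hout x s hs hxr
        omega

lemma fold_inv (D : List Int) (K : Int) (L : List Int) :
    ∀ (eaten : List Int) (etype : PySem.Set Int) (res : Int) (last : PySem.Dict Int Int),
      WinInv K eaten etype res last →
      (L.foldl (stepA D K) (eaten, etype, res)).2.2 = (L.foldl (stepB D K) (last, res)).2 := by
  induction L with
  | nil => intro _ _ _ _ _; rfl
  | cons i L ih =>
      intro eaten etype res last h
      obtain ⟨hres, hinv⟩ := step_inv D K i eaten etype res last h
      simp only [List.foldl_cons]
      have hA : stepA D K (eaten, etype, res) i
          = ((stepA D K (eaten, etype, res) i).1,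
             (stepA D K (eaten, etype, res) i).2.1,
             (stepA D K (eaten, etype, res) i).2.2) := rfl
      have hB : stepB D K (last, res) i
          = ((stepB D K (last, res) i).1, (stepB D K (last, res) i).2) := rfl
      rw [hA, hB, ← hres]
      exact ih _ _ _ _ hinv

-- ===== VERDICT (by name: the statement is the Claim_ definition above) =====
theorem getMaximumEatenDishCount_spec : Claim_equal_getMaximumEatenDishCount := by
  intro N D K _ _
  unfold Spec_getMaximumEatenDishCount getMaximumEatenDishCount getMaximumEatenDishCount_alt
  apply fold_inv
  refine ⟨List.nodup_nil, by simp, by simp [PySem.Set.empty], ?_, ?_⟩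
  · intro j hj; simp at hj
  · intro x s hs; simp [PySem.Dict.get?_empty] at hs
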